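-- pv_equiv track=rewrite | github.com/FarhanChowdhury248/RPG-discord-bot | src/cogs/treasure/Treasure.py | find_bracket_key
-- ===== SOURCE A (Python) =====
-- def find_bracket_key(target, brackets):
--     target_int = int(target)
--     copy_brackets = [int(br) for br in brackets]
--     copy_brackets.sort()
--     key = None
--     for br in copy_brackets:
--         key = br
--         if target_int <= br:
--             break
--     return str(key)
-- ===== SOURCE B (Python) =====
-- def find_bracket_key(target, brackets):
--     sorted_b = sorted(int(br) for br in brackets)
--     if not sorted_b:
--         return str(None)
--     t = int(target)
--     lo, hi = 0, len(sorted_b)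
--     while lo < hi:
--         mid = (lo + hi) // 2
--         if sorted_b[mid] < t:
--             lo = mid + 1
--         else:
--             hi = mid
--     if lo == len(sorted_b):
--         lo = len(sorted_b) - 1
--     return str(sorted_b[lo])
-- ===== Notes on version B (the rewrite author's own statement) =====
-- stated objective: alternative
-- what changed: Replaces A's linear break-on-first-hit scan over the sorted list with a hand-written binary search (bisect_left) for the smallest element >= target, falling back to the last index when all elements are smaller.
import Mathlib
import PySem

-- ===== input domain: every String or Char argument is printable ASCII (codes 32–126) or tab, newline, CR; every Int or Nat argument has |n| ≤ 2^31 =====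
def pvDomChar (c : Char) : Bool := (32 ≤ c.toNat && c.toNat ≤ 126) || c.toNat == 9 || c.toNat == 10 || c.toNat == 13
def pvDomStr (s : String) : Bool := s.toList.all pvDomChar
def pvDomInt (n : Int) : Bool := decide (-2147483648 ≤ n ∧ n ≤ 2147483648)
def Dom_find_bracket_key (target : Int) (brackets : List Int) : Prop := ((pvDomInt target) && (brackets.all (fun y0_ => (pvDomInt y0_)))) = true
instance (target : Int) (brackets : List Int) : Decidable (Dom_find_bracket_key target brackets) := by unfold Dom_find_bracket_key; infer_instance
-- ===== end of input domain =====

-- B replaces A's linear break-on-first-hit scan of the sorted list with a binary search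
-- for the smallest element ≥ target (last element as fallback); an alternative of the same cost.

-- ===== PORT A =====
-- the 'for br in copy_brackets: key = br; if target_int <= br: break' loop
def pvALoop (t : Int) : List Int → Option Int → Option Int
  | [], key => key
  | br :: rest, _ => if t ≤ br then some br else pvALoop t rest (some br)

def find_bracket_key (target : Int) (brackets : List Int) : String :=
  let target_int : Int := target
  let copy_brackets := brackets.map (fun br => br)
  let sorted_c := PySem.List.sorted copy_brackets (fun x => x) false
  match pvALoop target_int sorted_c none with
  | none => "None"
  | some k => PySem.Int.toStr k

-- ===== PORT B =====
-- the 'while lo < hi' binary-search loop of Source B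
def pvBSLoop (sb : List Int) (t : Int) (lo hi : Nat) : Nat :=
  if lo < hi then
    let mid := (lo + hi) / 2
    if PySem.List.pyGetD sb (mid : Int) 0 < t then pvBSLoop sb t (mid + 1) hi
    else pvBSLoop sb t lo mid
  else lo
termination_by hi - lo
decreasing_by all_goals omega

def find_bracket_key_alt (target : Int) (brackets : List Int) : String :=
  let sorted_b := PySem.List.sorted (brackets.map (fun br => br)) (fun x => x) false
  if sorted_b = [] then "None"
  else
    let t : Int := target
    let lo := pvBSLoop sorted_b t 0 sorted_b.length
    let lo2 := if lo = sorted_b.length then sorted_b.length - 1 else lo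
    PySem.Int.toStr (PySem.List.pyGetD sorted_b (lo2 : Int) 0)

-- ===== PRECONDITION & SPEC =====
def Spec_find_bracket_key (target : Int) (brackets : List Int) (out : String) : Prop := out = find_bracket_key_alt target brackets
instance (target : Int) (brackets : List Int) (out : String) : Decidable (Spec_find_bracket_key target brackets out) := by unfold Spec_find_bracket_key; infer_instance

-- ===== CLAIM (what is proved, stated in full; the proofs are below) =====
def Claim_equal_find_bracket_key : Prop := ∀ (target : Int) (brackets : List Int), Dom_find_bracket_key target brackets → Spec_find_bracket_key target brackets (find_bracket_key target brackets)

-- ===== LEMMAS AND PROOFS =====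

-- B's binary search lands on an index r with: everything before r is < t, everything from r on is ≥ t.
theorem pvBSLoop_spec (sb : List Int) (t : Int) (hs : sb.Pairwise (· ≤ ·)) :
    ∀ (lo hi : Nat), lo ≤ hi → hi ≤ sb.length →
    (∀ j (_ : j < sb.length), j < lo → sb[j] < t) →
    (∀ j (hj : j < sb.length), hi ≤ j → t ≤ sb[j]) →
    pvBSLoop sb t lo hi ≤ sb.length ∧
      (∀ j (_ : j < sb.length), j < pvBSLoop sb t lo hi → sb[j] < t) ∧
      (∀ j (hj : j < sb.length), pvBSLoop sb t lo hi ≤ j → t ≤ sb[j]) := by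
  intro lo hi
  induction lo, hi using pvBSLoop.induct sb t with
  | case1 lo hi hlt mid hmidlt ih =>
    intro _ hhi hlo hhiP
    rw [pvBSLoop, if_pos hlt, if_pos hmidlt]
    have hmid : mid < sb.length := by omega
    have hget : PySem.List.pyGetD sb (mid : Int) 0 = sb[mid] := by
      simp [PySem.List.pyGetD_natCast, List.getD_eq_getElem?_getD, hmid]
    apply ih (by omega) hhi
    · intro j hj hjlt
      rcases Nat.lt_or_ge j mid with h | h
      · calc sb[j] ≤ sb[mid] := List.pairwise_iff_getElem.mp hs j mid hj hmid h
          _ < t := by rw [← hget]; exact hmidlt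
      · have hje : j = mid := by omega
        subst hje; rw [← hget]; exact hmidlt
    · exact hhiP
  | case2 lo hi hlt mid hmidge ih =>
    intro _ hhi hlo hhiP
    rw [pvBSLoop, if_pos hlt, if_neg hmidge]
    have hmid : mid < sb.length := by omega
    have hget : PySem.List.pyGetD sb (mid : Int) 0 = sb[mid] := by
      simp [PySem.List.pyGetD_natCast, List.getD_eq_getElem?_getD, hmid]
    apply ih (by omega) (by omega) hlo
    intro j hj hjge
    have ht : t ≤ sb[mid] := by rw [← hget]; exact le_of_not_gt hmidge
    rcases Nat.eq_or_lt_of_le hjge with h | h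
    · subst h; exact ht
    · exact le_trans ht (List.pairwise_iff_getElem.mp hs mid j hmid hj h)
  | case3 lo hi hnlt =>
    intro hle hhi hlo hhiP
    rw [pvBSLoop, if_neg hnlt]
    exact ⟨by omega, hlo, fun j hj hge => hhiP j hj (by omega)⟩

-- A's scan over a sorted list returns exactly the element B's index picks out.
theorem pvALoop_eq (t : Int) :
    ∀ (sb : List Int), sb.Pairwise (· ≤ ·) → sb ≠ [] →
    ∀ (i : Nat), i ≤ sb.length →
    (∀ j (_ : j < sb.length), j < i → sb[j] < t) →
    (∀ j (hj : j < sb.length), i ≤ j → t ≤ sb[j]) →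
    ∀ (k : Option Int),
    pvALoop t sb k = some (sb.getD (if i = sb.length then sb.length - 1 else i) 0) := by
  intro sb
  induction sb with
  | nil => intro _ h; exact absurd rfl h
  | cons br rest ih =>
    intro hs _ i hi hlt hge k
    by_cases hbr : t ≤ br
    · have hi0 : i = 0 := by
        by_contra h
        have := hlt 0 (by simp) (by omega)
        simp at this; omega
      subst hi0
      rw [pvALoop, if_pos hbr, if_neg (by simp : ¬ (0 = (br :: rest).length))]
      rfl
    · have hbr' : br < t := by omega
      have hi1 : 1 ≤ i := by
        by_contra h
        have := hge 0 (by simp) (by omega)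
        simp at this; omega
      rw [pvALoop, if_neg hbr]
      by_cases hrne : rest = []
      · subst hrne
        have hie : i = 1 := by simp at hi; omega
        subst hie
        simp [pvALoop]
      · have hs' : rest.Pairwise (· ≤ ·) := (List.pairwise_cons.mp hs).2
        have hres := ih hs' hrne (i - 1) (by simp at hi ⊢; omega)
          (fun j hj hjlt => by
            have := hlt (j+1) (by simp; omega) (by omega)
            simpa using this)
          (fun j hj hjge => by
            have := hge (j+1) (by simp; omega) (by omega)
            simpa using this) (some br)
        rw [hres]
        congr 1
        by_cases hieq : i = (br :: rest).length
        · have hie' : i - 1 = rest.length := by simp at hieq; omega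
          rw [if_pos hieq, if_pos hie']
          have h1 : (br :: rest).length - 1 = (rest.length - 1) + 1 := by
            have := List.length_pos_iff.mpr hrne
            simp; omega
          rw [h1, List.getD_cons_succ]
        · have hne' : ¬ (i - 1 = rest.length) := by simp at hieq ⊢; omega
          rw [if_neg hieq, if_neg hne']
          have h1 : i = (i - 1) + 1 := by omega
          rw [h1, List.getD_cons_succ]
          congr 1

-- the two bodies agree for any sorted working list
theorem pv_main_core (t : Int) (sb : List Int) (hs : sb.Pairwise (· ≤ ·)) :
    (match pvALoop t sb none with
     | none => "None"
     | some k => PySem.Int.toStr k) =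
    (if sb = [] then "None"
     else PySem.Int.toStr (PySem.List.pyGetD sb
       (((if pvBSLoop sb t 0 sb.length = sb.length then sb.length - 1
          else pvBSLoop sb t 0 sb.length) : Nat) : Int) 0)) := by
  by_cases hne : sb = []
  · subst hne; simp [pvALoop]
  · rw [if_neg hne]
    obtain ⟨hle, hlt, hge⟩ := pvBSLoop_spec sb t hs 0 sb.length (by omega) le_rfl
      (fun j hj h => absurd h (by omega)) (fun j hj h => absurd h (by omega))
    rw [pvALoop_eq t sb hs hne (pvBSLoop sb t 0 sb.length) hle hlt hge none]
    rw [PySem.List.pyGetD_natCast]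

-- ===== VERDICT (by name: the statement is the Claim_ definition above) =====
theorem find_bracket_key_spec : Claim_equal_find_bracket_key := by
  intro target brackets _
  exact pv_main_core target (PySem.List.sorted (brackets.map (fun br => br)) (fun x => x) false)
    (PySem.List.sorted_pairwise (brackets.map (fun br => br)) (fun x => x))
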